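-- pv_equiv track=rewrite | github.com/Pratik3617/Ultra-Doc-Intelligence | app/utils/source_content.py | highlight_context
-- ===== SOURCE A (Python) =====
-- def highlight_context(text: str) -> str:
--     """Light highlighting of common logistics keywords"""
--     highlights = [
--         "lbs", "kg",
--         "Delivery Date",
--         "Pickup",
--         "Drop",
--         "Cherry Avenue",
--         "Fontana",
--         "FTL",
--         "Container"
--     ]
--     for h in highlights:
--         text = text.replace(h, f"**{h}**")
--     return text
-- ===== SOURCE B (Python) =====
-- import re
--
-- _HIGHLIGHTS = [
--     "lbs", "kg",
--     "Delivery Date",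
--     "Pickup",
--     "Drop",
--     "Cherry Avenue",
--     "Fontana",
--     "FTL",
--     "Container"
-- ]
-- _PATTERN = re.compile("|".join(re.escape(h) for h in _HIGHLIGHTS))
--
-- def highlight_context(text: str) -> str:
--     """Light highlighting of common logistics keywords (single regex pass)"""
--     return _PATTERN.sub(lambda m: f"**{m.group()}**", text)
-- ===== Notes on version B (the rewrite author's own statement) =====
-- stated objective: alternative
-- what changed: Replaces nine sequential full-text str.replace passes by a single precompiled regex alternation (one left-to-right pass with re.sub), safe because the keywords are pairwise non-overlapping.
import Mathlib
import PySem

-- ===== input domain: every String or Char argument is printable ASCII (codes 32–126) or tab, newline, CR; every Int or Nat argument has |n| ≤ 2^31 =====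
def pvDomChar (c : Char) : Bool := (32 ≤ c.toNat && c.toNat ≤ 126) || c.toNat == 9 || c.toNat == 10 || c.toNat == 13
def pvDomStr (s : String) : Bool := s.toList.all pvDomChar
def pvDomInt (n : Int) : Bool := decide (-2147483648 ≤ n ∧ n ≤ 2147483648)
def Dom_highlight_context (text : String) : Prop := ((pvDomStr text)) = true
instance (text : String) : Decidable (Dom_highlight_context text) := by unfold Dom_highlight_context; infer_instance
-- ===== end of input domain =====

-- B replaces nine sequential full-text str.replace passes by one left-to-right scan that
-- matches the keyword alternation in list order (a precompiled re.sub in Python).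


-- ===== PORT A =====
-- for h in highlights: text = text.replace(h, f"**{h}**")
def highlight_context (text : String) : String :=
  let highlights : List String :=
    ["lbs", "kg", "Delivery Date", "Pickup", "Drop", "Cherry Avenue", "Fontana", "FTL", "Container"]
  highlights.foldl (fun t h => PySem.Str.replace t h ("**" ++ h ++ "**")) text

-- ===== PORT B =====
-- the alternation pattern of Source B: the keywords, in the original list order, as char lists
def pvHighlights : List (List Char) :=
  ["lbs".toList, "kg".toList, "Delivery Date".toList, "Pickup".toList, "Drop".toList,
   "Cherry Avenue".toList, "Fontana".toList, "FTL".toList, "Container".toList]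

-- hand port of re.sub with a plain alternation of escaped literals (exact for such a pattern):
-- one left-to-right scan; at each position the first alternative (in pattern order) that
-- matches is wrapped in '**'…'**' and the scan resumes right after the match.
def pvSub (keys : List (List Char)) (cs : List Char) : List Char :=
  match cs with
  | [] => []
  | c :: rest =>
    match keys.find? (fun k => k.isPrefixOf (c :: rest)) with
    | some k => '*' :: '*' :: (k ++ '*' :: '*' :: pvSub keys (rest.drop (k.length - 1)))
    | none => c :: pvSub keys rest
termination_by cs.length
decreasing_by
  · simp only [List.length_drop, List.length_cons]; omega
  · simp

def highlight_context_alt (text : String) : String :=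
  String.ofList (pvSub pvHighlights text.toList)

-- ===== PRECONDITION & SPEC =====
def Spec_highlight_context (text : String) (out : String) : Prop := out = highlight_context_alt text
instance (text : String) (out : String) : Decidable (Spec_highlight_context text out) := by unfold Spec_highlight_context; infer_instance

-- ===== CLAIM (what is proved, stated in full; the proofs are below) =====
def Claim_equal_highlight_context : Prop := ∀ (text : String), Dom_highlight_context text → Spec_highlight_context text (highlight_context text)

-- ===== LEMMAS AND PROOFS =====

-- "**" ++ k ++ "**" at the char level
def pvWrap (k : List Char) : List Char := '*' :: '*' :: (k ++ ['*', '*'])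

-- str.replace old→new as a clean structural recursion (old ≠ [])
def pvRepl (old new : List Char) (cs : List Char) : List Char :=
  match cs with
  | [] => []
  | c :: rest =>
    if old.isPrefixOf (c :: rest) then new ++ pvRepl old new (rest.drop (old.length - 1))
    else c :: pvRepl old new rest
termination_by cs.length
decreasing_by
  · simp only [List.length_drop, List.length_cons]; omega
  · simp

lemma pvRepl_go_eq (old new : List Char) (hne : old ≠ []) :
    ∀ (fuel : Nat) (l acc : List Char), l.length ≤ fuel →
      PySem.Chars.replace.go old new fuel l acc = acc.reverse ++ pvRepl old new l := by
  intro fuel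
  induction fuel with
  | zero =>
    intro l acc hl
    have : l = [] := List.length_eq_zero_iff.1 (Nat.le_zero.1 hl)
    subst this
    simp [PySem.Chars.replace.go, pvRepl]
  | succ fuel ih =>
    intro l acc hl
    cases l with
    | nil => simp [PySem.Chars.replace.go, pvRepl]
    | cons c t =>
      rw [PySem.Chars.replace.go]
      by_cases hp : old.isPrefixOf (c :: t)
      · rw [if_pos hp]
        have hol : 1 ≤ old.length := by
          cases old with | nil => exact absurd rfl hne | cons _ _ => simp
        have hdl : (List.drop old.length (c :: t)).length ≤ fuel := by
          simp only [List.length_drop, List.length_cons]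
          simp only [List.length_cons] at hl
          omega
        rw [ih _ _ hdl]
        have hdrop : List.drop old.length (c :: t) = t.drop (old.length - 1) := by
          cases old with
          | nil => exact absurd rfl hne
          | cons a o => simp [List.drop_succ_cons]
        rw [pvRepl, if_pos hp, hdrop]
        simp
      · rw [if_neg hp]
        have : t.length ≤ fuel := by simp only [List.length_cons] at hl; omega
        rw [ih _ _ this]
        rw [pvRepl, if_neg hp]
        simp

lemma pvReplace_eq (old new s : List Char) (hne : old ≠ []) :
    PySem.Chars.replace s old new = pvRepl old new s := by
  rw [PySem.Chars.replace]
  rw [if_neg (by simpa [List.isEmpty_iff] using hne)]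
  simpa using pvRepl_go_eq old new hne s.length s [] le_rfl

-- p <+: a ++ b splits at a's border
lemma pvPrefix_append_cases {p a b : List Char} (h : p <+: a ++ b) :
    p <+: a ∨ (a <+: p ∧ p.drop a.length <+: b) := by
  rcases h with ⟨t, ht⟩
  by_cases hl : p.length ≤ a.length
  · left
    have h1 : (p ++ t).take p.length = p := by simp
    rw [ht] at h1
    have h2 : (a ++ b).take p.length = a.take p.length := List.take_append_of_le_length hl
    rw [h2] at h1
    rw [← h1]
    exact List.take_prefix _ _
  · right
    have hla : a.length ≤ p.length := by omega
    constructor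
    · have h1 : (a ++ b).take a.length = a := by simp
      rw [← ht] at h1
      rw [List.take_append_of_le_length hla] at h1
      rw [← h1]
      exact List.take_prefix _ _
    · have h1 : (a ++ b).drop a.length = b := by simp
      rw [← ht, List.drop_append_of_le_length hla] at h1
      exact ⟨t, h1⟩

lemma pvStar_mem_of_prefix {p s : List Char} (h : p <+: '*' :: s) (hne : p ≠ []) : '*' ∈ p := by
  cases p with
  | nil => exact absurd rfl hne
  | cons c q =>
    rcases (List.cons_prefix_cons.1 h) with ⟨rfl, _⟩
    exact List.mem_cons_self

-- a star-free prefix of the scan output is a prefix of the input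
lemma pvSub_prefix (keys : List (List Char)) :
    ∀ (cs p : List Char), '*' ∉ p → p <+: pvSub keys cs → p <+: cs := by
  intro cs
  induction cs with
  | nil => intro p _ hp; simpa [pvSub] using hp
  | cons c rest ih =>
    intro p hstar hp
    rw [pvSub] at hp
    cases hfind : keys.find? (fun k => k.isPrefixOf (c :: rest)) with
    | some k =>
      rw [hfind] at hp
      cases p with
      | nil => exact List.nil_prefix
      | cons a q => exact absurd (pvStar_mem_of_prefix hp (by simp)) hstar
    | none =>
      rw [hfind] at hp
      cases p with
      | nil => exact List.nil_prefix
      | cons a q =>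
        rcases List.cons_prefix_cons.1 hp with ⟨rfl, hq⟩
        exact List.cons_prefix_cons.2 ⟨rfl, ih q (fun hm => hstar (List.mem_cons_of_mem _ hm)) hq⟩

-- replacement skips a region in which no occurrence of old starts
lemma pvRepl_skip (old new : List Char) :
    ∀ (pre t : List Char),
      (∀ j, j < pre.length → ¬ old.isPrefixOf (List.drop j (pre ++ t))) →
      pvRepl old new (pre ++ t) = pre ++ pvRepl old new t := by
  intro pre
  induction pre with
  | nil => intro t _; simp
  | cons c pre' ih =>
    intro t H
    have h0 : ¬ old.isPrefixOf (c :: (pre' ++ t)) := by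
      have := H 0 (by simp)
      simpa using this
    rw [List.cons_append, pvRepl, if_neg h0]
    rw [ih t (fun j hj => by
      have := H (j + 1) (by simp; omega)
      simpa using this)]
    simp

-- no occurrence of a star-free p that is not an infix of h starts inside '**h**'
lemma pvNo_match_in_wrap {h p : List Char} (hstar : '*' ∉ p) (hne : p ≠ []) (hinf : ¬ p <:+: h) :
    ∀ (t : List Char) (j : Nat), j < (pvWrap h).length →
      ¬ p.isPrefixOf (List.drop j (pvWrap h ++ t)) := by
  intro t j hj hpre
  rw [List.isPrefixOf_iff_prefix] at hpre
  have hshape : pvWrap h ++ t = '*' :: '*' :: (h ++ '*' :: '*' :: t) := by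
    simp [pvWrap]
  rw [hshape] at hpre
  have hjlen : j < h.length + 4 := by
    simp only [pvWrap, List.length_cons, List.length_append, List.length_nil] at hj
    omega
  match j with
  | 0 => exact hstar (pvStar_mem_of_prefix hpre hne)
  | 1 =>
    rw [List.drop_succ_cons, List.drop_zero] at hpre
    exact hstar (pvStar_mem_of_prefix hpre hne)
  | (j + 2) =>
    rw [List.drop_succ_cons, List.drop_succ_cons] at hpre
    by_cases hjh : j ≤ h.length
    · rw [List.drop_append, Nat.sub_eq_zero_of_le hjh, List.drop_zero] at hpre
      rcases pvPrefix_append_cases hpre with h1 | ⟨h2, h3⟩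
      · obtain ⟨r, hr⟩ := h1
        exact hinf ⟨h.take j, r, by rw [List.append_assoc, hr, List.take_append_drop]⟩
      · by_cases hq : p.length ≤ (h.drop j).length
        · have heq : h.drop j = p := List.IsPrefix.eq_of_length_le h2 hq
          exact hinf ⟨h.take j, [], by rw [List.append_nil, ← heq, List.take_append_drop]⟩
        · have hqne : p.drop (h.drop j).length ≠ [] := by
            intro hnil
            have hz := congrArg List.length hnil
            simp only [List.length_drop] at hz
            simp only [List.length_drop] at hq
            simp only [List.length_nil] at hz
            omega
          have := pvStar_mem_of_prefix h3 hqne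
          exact hstar (List.mem_of_mem_drop this)
    · have hje : j = h.length + 1 := by omega
      subst hje
      rw [List.drop_append, List.drop_of_length_le (by omega)] at hpre
      have : h.length + 1 - h.length = 1 := by omega
      rw [this, List.nil_append, List.drop_succ_cons, List.drop_zero] at hpre
      exact hstar (pvStar_mem_of_prefix hpre hne)

-- the scan copies a match-free region verbatim
lemma pvSub_take (keys : List (List Char)) :
    ∀ (m : Nat) (cs : List Char), m ≤ cs.length →
      (∀ j, j < m → keys.find? (fun k => k.isPrefixOf (cs.drop j)) = none) →
      pvSub keys cs = cs.take m ++ pvSub keys (cs.drop m) := by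
  intro m
  induction m with
  | zero => intro cs _ _; simp
  | succ m ih =>
    intro cs hm H
    cases cs with
    | nil => simp at hm
    | cons c rest =>
      have h0 : keys.find? (fun k => k.isPrefixOf (c :: rest)) = none := by
        simpa using H 0 (by omega)
      rw [pvSub, h0]
      rw [ih rest (by simpa [Nat.succ_le_succ_iff] using hm)
        (fun j hj => by simpa using H (j + 1) (by omega))]
      simp

lemma pvSub_nil (cs : List Char) : pvSub [] cs = cs := by
  induction cs with
  | nil => simp [pvSub]
  | cons c rest ih => rw [pvSub]; simp [ih]

-- when p matches at the head, the replacement fires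
lemma pvRepl_head (p new T : List Char) (hne : p ≠ []) :
    pvRepl p new (p ++ T) = new ++ pvRepl p new T := by
  cases p with
  | nil => exact absurd rfl hne
  | cons a q =>
    rw [List.cons_append, pvRepl,
      if_pos (List.isPrefixOf_iff_prefix.2 (by exact List.prefix_append _ _))]
    congr 1
    congr 1
    simp

-- the side conditions under which one more sequential replace equals one more alternative:
-- p nonempty and star-free, and p neither occurs inside any earlier keyword nor overlaps one
abbrev pvOK (Hk : List (List Char)) (p : List Char) : Prop :=
  p ≠ [] ∧ '*' ∉ p ∧ ∀ h ∈ Hk, ¬ p <:+: h ∧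
    ∀ j, j < p.length → 0 < j → ¬ h <+: p.drop j ∧ ¬ p.drop j <+: h

-- main step: replacing p in the scan output of Hk is the scan with p appended
lemma pvStep (Hk : List (List Char)) (p : List Char) (hok : pvOK Hk p) :
    ∀ (cs : List Char), pvRepl p (pvWrap p) (pvSub Hk cs) = pvSub (Hk ++ [p]) cs := by
  obtain ⟨hpne, hpstar, hK⟩ := hok
  suffices H : ∀ (n : Nat) (cs : List Char), cs.length ≤ n →
      pvRepl p (pvWrap p) (pvSub Hk cs) = pvSub (Hk ++ [p]) cs by
    intro cs; exact H cs.length cs le_rfl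
  intro n
  induction n with
  | zero =>
    intro cs hl
    have : cs = [] := List.length_eq_zero_iff.1 (Nat.le_zero.1 hl)
    subst this
    simp [pvSub, pvRepl]
  | succ n ih =>
    intro cs hl
    cases cs with
    | nil => simp [pvSub, pvRepl]
    | cons c rest =>
      cases hfind : Hk.find? (fun k => k.isPrefixOf (c :: rest)) with
      | some k =>
        have hkmem := List.mem_of_find?_eq_some hfind
        have hkp := List.find?_some (p := fun k : List Char => k.isPrefixOf (c :: rest)) hfind
        have hkpre : k <+: c :: rest := List.isPrefixOf_iff_prefix.1 (by simpa using hkp)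
        have hkinf : ¬ p <:+: k := (hK k hkmem).1
        have hfind' : (Hk ++ [p]).find? (fun k => k.isPrefixOf (c :: rest)) = some k := by
          rw [List.find?_append, hfind]; simp
        rw [pvSub, hfind]
        conv_rhs => rw [pvSub, hfind']
        dsimp only
        have hshape : '*' :: '*' :: (k ++ '*' :: '*' :: pvSub Hk (rest.drop (k.length - 1)))
            = pvWrap k ++ pvSub Hk (rest.drop (k.length - 1)) := by simp [pvWrap]
        rw [hshape, pvRepl_skip p (pvWrap p) (pvWrap k) _
          (fun j hj => pvNo_match_in_wrap hpstar hpne hkinf _ j hj)]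
        rw [ih (rest.drop (k.length - 1)) (by
          simp only [List.length_drop]
          simp only [List.length_cons] at hl
          omega)]
        simp [pvWrap]
      | none =>
        by_cases hp : p.isPrefixOf (c :: rest)
        · -- p matches here and no earlier keyword does
          have hppre : p <+: c :: rest := List.isPrefixOf_iff_prefix.1 hp
          have hplen : p.length ≤ (c :: rest).length := hppre.length_le
          have hfind' : (Hk ++ [p]).find? (fun k => k.isPrefixOf (c :: rest)) = some p := by
            rw [List.find?_append, hfind, Option.none_or]
            simp [hp]
          -- no keyword of Hk matches anywhere inside the occurrence of p
          have hnomatch : ∀ j, j < p.length →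
              Hk.find? (fun k => k.isPrefixOf ((c :: rest).drop j)) = none := by
            intro j hj
            rcases Nat.eq_zero_or_pos j with rfl | hj0
            · simpa using hfind
            · rw [List.find?_eq_none]
              intro k hk hkpre
              obtain ⟨_, hov⟩ := hK k hk
              obtain ⟨u, hu⟩ := hppre
              rw [List.isPrefixOf_iff_prefix, ← hu, List.drop_append,
                Nat.sub_eq_zero_of_le (le_of_lt hj), List.drop_zero] at hkpre
              rcases pvPrefix_append_cases hkpre with h1 | ⟨h2, _⟩
              · exact (hov j hj hj0).1 h1
              · exact (hov j hj hj0).2 h2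
          rw [pvSub_take Hk p.length (c :: rest) hplen hnomatch,
            ← List.prefix_iff_eq_take.1 hppre]
          rw [pvRepl_head p (pvWrap p) _ hpne]
          conv_rhs => rw [pvSub, hfind']
          have hdrop : (c :: rest).drop p.length = rest.drop (p.length - 1) := by
            cases p with
            | nil => exact absurd rfl hpne
            | cons a q => simp
          dsimp only
          rw [hdrop, ih (rest.drop (p.length - 1)) (by
            simp only [List.length_drop]
            simp only [List.length_cons] at hl
            omega)]
          simp [pvWrap]
        · -- nothing matches here
          have hfind' : (Hk ++ [p]).find? (fun k => k.isPrefixOf (c :: rest)) = none := by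
            rw [List.find?_append, hfind, Option.none_or]
            simp [hp]
          rw [pvSub, hfind]
          have hnp : ¬ p.isPrefixOf (c :: pvSub Hk rest) := by
            intro hc
            apply hp
            rw [List.isPrefixOf_iff_prefix] at hc ⊢
            have : c :: pvSub Hk rest = pvSub Hk (c :: rest) := by rw [pvSub, hfind]
            rw [this] at hc
            exact pvSub_prefix Hk (c :: rest) p hpstar hc
          rw [pvRepl, if_neg hnp]
          rw [ih rest (by simp only [List.length_cons] at hl; omega)]
          conv_rhs => rw [pvSub, hfind']

-- the nine sequential replaces collapse to the nine-way scan, char level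
set_option maxHeartbeats 2000000 in
lemma pvChain (cs : List Char) :
    pvRepl "Container".toList (pvWrap "Container".toList)
      (pvRepl "FTL".toList (pvWrap "FTL".toList)
        (pvRepl "Fontana".toList (pvWrap "Fontana".toList)
          (pvRepl "Cherry Avenue".toList (pvWrap "Cherry Avenue".toList)
            (pvRepl "Drop".toList (pvWrap "Drop".toList)
              (pvRepl "Pickup".toList (pvWrap "Pickup".toList)
                (pvRepl "Delivery Date".toList (pvWrap "Delivery Date".toList)
                  (pvRepl "kg".toList (pvWrap "kg".toList)
                    (pvRepl "lbs".toList (pvWrap "lbs".toList) cs))))))))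
    = pvSub pvHighlights cs := by
  have e1 : pvRepl "lbs".toList (pvWrap "lbs".toList) cs
      = pvSub ["lbs".toList] cs := by
    have := pvStep [] "lbs".toList (by decide) cs
    rwa [pvSub_nil] at this
  have e2 := pvStep ["lbs".toList] "kg".toList (by decide) cs
  have e3 := pvStep ["lbs".toList, "kg".toList] "Delivery Date".toList (by decide) cs
  have e4 := pvStep ["lbs".toList, "kg".toList, "Delivery Date".toList] "Pickup".toList (by decide) cs
  have e5 := pvStep ["lbs".toList, "kg".toList, "Delivery Date".toList, "Pickup".toList] "Drop".toList (by decide) cs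
  have e6 := pvStep ["lbs".toList, "kg".toList, "Delivery Date".toList, "Pickup".toList, "Drop".toList] "Cherry Avenue".toList (by decide) cs
  have e7 := pvStep ["lbs".toList, "kg".toList, "Delivery Date".toList, "Pickup".toList, "Drop".toList, "Cherry Avenue".toList] "Fontana".toList (by decide) cs
  have e8 := pvStep ["lbs".toList, "kg".toList, "Delivery Date".toList, "Pickup".toList, "Drop".toList, "Cherry Avenue".toList, "Fontana".toList] "FTL".toList (by decide) cs
  have e9 := pvStep ["lbs".toList, "kg".toList, "Delivery Date".toList, "Pickup".toList, "Drop".toList, "Cherry Avenue".toList, "Fontana".toList, "FTL".toList] "Container".toList (by decide) cs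
  simp only [List.cons_append, List.nil_append] at e2 e3 e4 e5 e6 e7 e8 e9
  rw [e1, e2, e3, e4, e5, e6, e7, e8, e9]
  rfl

-- ===== VERDICT (by name: the statement is the Claim_ definition above) =====
set_option maxHeartbeats 2000000 in
theorem highlight_context_spec : Claim_equal_highlight_context := by
  intro text _
  unfold Spec_highlight_context highlight_context highlight_context_alt
  simp only [List.foldl_cons, List.foldl_nil]
  simp only [PySem.Str.replace, String.toList_ofList]
  refine congrArg String.ofList ?_
  have q1 := pvReplace_eq "lbs".toList ("**" ++ "lbs" ++ "**").toList
    (text.toList) (by decide)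
  rw [q1]
  have q2 := pvReplace_eq "kg".toList ("**" ++ "kg" ++ "**").toList
    ((pvRepl "lbs".toList ("**" ++ "lbs" ++ "**").toList text.toList)) (by decide)
  rw [q2]
  have q3 := pvReplace_eq "Delivery Date".toList ("**" ++ "Delivery Date" ++ "**").toList
    ((pvRepl "kg".toList ("**" ++ "kg" ++ "**").toList (pvRepl "lbs".toList ("**" ++ "lbs" ++ "**").toList text.toList))) (by decide)
  rw [q3]
  have q4 := pvReplace_eq "Pickup".toList ("**" ++ "Pickup" ++ "**").toList
    ((pvRepl "Delivery Date".toList ("**" ++ "Delivery Date" ++ "**").toList (pvRepl "kg".toList ("**" ++ "kg" ++ "**").toList (pvRepl "lbs".toList ("**" ++ "lbs" ++ "**").toList text.toList)))) (by decide)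
  rw [q4]
  have q5 := pvReplace_eq "Drop".toList ("**" ++ "Drop" ++ "**").toList
    ((pvRepl "Pickup".toList ("**" ++ "Pickup" ++ "**").toList (pvRepl "Delivery Date".toList ("**" ++ "Delivery Date" ++ "**").toList (pvRepl "kg".toList ("**" ++ "kg" ++ "**").toList (pvRepl "lbs".toList ("**" ++ "lbs" ++ "**").toList text.toList))))) (by decide)
  rw [q5]
  have q6 := pvReplace_eq "Cherry Avenue".toList ("**" ++ "Cherry Avenue" ++ "**").toList
    ((pvRepl "Drop".toList ("**" ++ "Drop" ++ "**").toList (pvRepl "Pickup".toList ("**" ++ "Pickup" ++ "**").toList (pvRepl "Delivery Date".toList ("**" ++ "Delivery Date" ++ "**").toList (pvRepl "kg".toList ("**" ++ "kg" ++ "**").toList (pvRepl "lbs".toList ("**" ++ "lbs" ++ "**").toList text.toList)))))) (by decide)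
  rw [q6]
  have q7 := pvReplace_eq "Fontana".toList ("**" ++ "Fontana" ++ "**").toList
    ((pvRepl "Cherry Avenue".toList ("**" ++ "Cherry Avenue" ++ "**").toList (pvRepl "Drop".toList ("**" ++ "Drop" ++ "**").toList (pvRepl "Pickup".toList ("**" ++ "Pickup" ++ "**").toList (pvRepl "Delivery Date".toList ("**" ++ "Delivery Date" ++ "**").toList (pvRepl "kg".toList ("**" ++ "kg" ++ "**").toList (pvRepl "lbs".toList ("**" ++ "lbs" ++ "**").toList text.toList))))))) (by decide)
  rw [q7]
  have q8 := pvReplace_eq "FTL".toList ("**" ++ "FTL" ++ "**").toList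
    ((pvRepl "Fontana".toList ("**" ++ "Fontana" ++ "**").toList (pvRepl "Cherry Avenue".toList ("**" ++ "Cherry Avenue" ++ "**").toList (pvRepl "Drop".toList ("**" ++ "Drop" ++ "**").toList (pvRepl "Pickup".toList ("**" ++ "Pickup" ++ "**").toList (pvRepl "Delivery Date".toList ("**" ++ "Delivery Date" ++ "**").toList (pvRepl "kg".toList ("**" ++ "kg" ++ "**").toList (pvRepl "lbs".toList ("**" ++ "lbs" ++ "**").toList text.toList)))))))) (by decide)
  rw [q8]
  have q9 := pvReplace_eq "Container".toList ("**" ++ "Container" ++ "**").toList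
    ((pvRepl "FTL".toList ("**" ++ "FTL" ++ "**").toList (pvRepl "Fontana".toList ("**" ++ "Fontana" ++ "**").toList (pvRepl "Cherry Avenue".toList ("**" ++ "Cherry Avenue" ++ "**").toList (pvRepl "Drop".toList ("**" ++ "Drop" ++ "**").toList (pvRepl "Pickup".toList ("**" ++ "Pickup" ++ "**").toList (pvRepl "Delivery Date".toList ("**" ++ "Delivery Date" ++ "**").toList (pvRepl "kg".toList ("**" ++ "kg" ++ "**").toList (pvRepl "lbs".toList ("**" ++ "lbs" ++ "**").toList text.toList))))))))) (by decide)
  rw [q9]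
  rw [show ("**" ++ "lbs" ++ "**").toList = pvWrap "lbs".toList from by decide,
    show ("**" ++ "kg" ++ "**").toList = pvWrap "kg".toList from by decide,
    show ("**" ++ "Delivery Date" ++ "**").toList = pvWrap "Delivery Date".toList from by decide,
    show ("**" ++ "Pickup" ++ "**").toList = pvWrap "Pickup".toList from by decide,
    show ("**" ++ "Drop" ++ "**").toList = pvWrap "Drop".toList from by decide,
    show ("**" ++ "Cherry Avenue" ++ "**").toList = pvWrap "Cherry Avenue".toList from by decide,
    show ("**" ++ "Fontana" ++ "**").toList = pvWrap "Fontana".toList from by decide,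
    show ("**" ++ "FTL" ++ "**").toList = pvWrap "FTL".toList from by decide,
    show ("**" ++ "Container" ++ "**").toList = pvWrap "Container".toList from by decide]
  exact pvChain text.toList
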